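-- pv_equiv track=rewrite | github.com/mhaw/speakloudtts | extractor.py | _choose_best_extraction
-- ===== SOURCE A (Python) =====
-- def _choose_best_extraction(results: list) -> dict:
--
--     """
--     Chooses the best extraction result based on heuristics.
--     - Prioritizes extractions with both title and author, then by word count.
--     - Falls back to structured content, then longest text.
--     """
--     if not results:
--         return None
--
--     # 1. Prioritize extractions with both title and author, then by word count
--     with_title_and_author = [r for r in results if r.get("title") and r.get("author") and r.get("text")]
--     if with_title_and_author:
--         return max(with_title_and_author, key=lambda r: len(r.get("text", "")))
--
--     # 2. Fallback: Prefer extractions that produced structured text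
--     with_structured_text = [r for r in results if r.get("structured_text")]
--     if with_structured_text:
--         return max(with_structured_text, key=lambda r: len(r.get("text", "")))
--
--     # 3. Final Fallback: return the one with the longest text
--     return max(results, key=lambda r: len(r.get("text", "")))
-- ===== SOURCE B (Python) =====
-- def _choose_best_extraction(results: list) -> dict:
--     if not results:
--         return None
--     def rank(r):
--         if r.get("title") and r.get("author") and r.get("text"):
--             return 2
--         if r.get("structured_text"):
--             return 1
--         return 0
--     return max(results, key=lambda r: (rank(r), len(r.get("text", ""))))
-- ===== Notes on version B (the rewrite author's own statement) =====
-- stated objective: simpler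
-- what changed: A's three staged list-comprehension filters with fallback returns are replaced by a single max over all results keyed by a composite (priority rank, text length) tuple.
import Mathlib
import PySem

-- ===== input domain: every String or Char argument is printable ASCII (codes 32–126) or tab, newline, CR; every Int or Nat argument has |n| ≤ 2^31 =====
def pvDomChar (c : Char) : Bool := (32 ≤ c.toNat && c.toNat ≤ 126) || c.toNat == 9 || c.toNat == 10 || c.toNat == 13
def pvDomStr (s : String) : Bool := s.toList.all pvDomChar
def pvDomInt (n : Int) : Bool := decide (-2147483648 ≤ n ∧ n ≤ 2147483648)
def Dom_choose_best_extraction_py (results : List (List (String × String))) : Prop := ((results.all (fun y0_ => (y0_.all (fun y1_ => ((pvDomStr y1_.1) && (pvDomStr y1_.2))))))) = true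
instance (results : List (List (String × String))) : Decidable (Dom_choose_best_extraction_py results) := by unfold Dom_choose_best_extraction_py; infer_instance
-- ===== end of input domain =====

-- B replaces A's three staged filter-then-max passes by ONE keyed max over a composite (rank, text-length) key; equal return value, no mutation.

-- ===== PORT A =====
-- r.get(k) is truthy iff the key is present with a non-empty string
def pvTruthy (r : List (String × String)) (k : String) : Bool :=
  match (PySem.Dict.mk r).get? k with
  | none => false
  | some s => s != ""

-- len(r.get("text", ""))
def pvTextLen (r : List (String × String)) : Int :=
  PySem.Str.len ((PySem.Dict.mk r).getD "text" "")

def pvP2 (r : List (String × String)) : Bool :=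
  pvTruthy r "title" && pvTruthy r "author" && pvTruthy r "text"

def pvPS (r : List (String × String)) : Bool :=
  pvTruthy r "structured_text"

def choose_best_extraction_py (results : List (List (String × String))) : Option (List (String × String)) :=
  if results = [] then none
  else
    let with_title_and_author := results.filter pvP2
    if with_title_and_author ≠ [] then PySem.List.max? with_title_and_author pvTextLen
    else
      let with_structured_text := results.filter pvPS
      if with_structured_text ≠ [] then PySem.List.max? with_structured_text pvTextLen
      else PySem.List.max? results pvTextLen

-- ===== PORT B =====
def pvRank (r : List (String × String)) : Nat :=
  if pvP2 r then 2 else if pvPS r then 1 else 0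

def choose_best_extraction_py_alt (results : List (List (String × String))) : Option (List (String × String)) :=
  if results = [] then none
  else PySem.List.max2? results pvRank pvTextLen

-- ===== PRECONDITION & SPEC =====
def Spec_choose_best_extraction_py (results : List (List (String × String))) (out : Option (List (String × String))) : Prop := out = choose_best_extraction_py_alt results
instance (results : List (List (String × String))) (out : Option (List (String × String))) : Decidable (Spec_choose_best_extraction_py results out) := by unfold Spec_choose_best_extraction_py; infer_instance

-- ===== CLAIM (what is proved, stated in full; the proofs are below) =====
def Claim_equal_choose_best_extraction_py : Prop := ∀ (results : List (List (String × String))), Dom_choose_best_extraction_py results → Spec_choose_best_extraction_py results (choose_best_extraction_py results)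

-- ===== LEMMAS AND PROOFS =====

theorem pv_max2?_append {α : Type} (k1 : α → Nat) (k2 : α → Int) (xs : List α) (x : α) :
    PySem.List.max2? (xs ++ [x]) k1 k2 =
      match PySem.List.max2? xs k1 k2 with
      | none => some x
      | some m => if (decide (k1 m < k1 x) || !decide (k1 x < k1 m) && decide (k2 m < k2 x)) = true
                  then some x else some m := by
  unfold PySem.List.max2?
  rw [List.foldl_append]
  simp only [List.foldl]
  rfl

theorem pv_max?_append {α : Type} (k : α → Int) (xs : List α) (x : α) :
    PySem.List.max? (xs ++ [x]) k =
      match PySem.List.max? xs k with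
      | none => some x
      | some m => if k m < k x then some x else some m := by
  unfold PySem.List.max?
  rw [List.foldl_append]
  simp only [List.foldl]
  rfl

theorem pv_max?_singleton {α : Type} (k : α → Int) (x : α) :
    PySem.List.max? [x] k = some x := rfl

theorem pv_max?_nil {α : Type} (k : α → Int) : PySem.List.max? ([] : List α) k = none := rfl

theorem pv_staged_eq {α : Type} (p2 ps : α → Bool) (k : α → Int) (xs : List α) :
    PySem.List.max2? xs (fun x => if p2 x then (2 : Nat) else if ps x then 1 else 0) k
      = (if xs.filter p2 ≠ [] then PySem.List.max? (xs.filter p2) k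
         else if xs.filter ps ≠ [] then PySem.List.max? (xs.filter ps) k
         else PySem.List.max? xs k) := by
  induction xs using List.reverseRecOn with
  | nil => simp [PySem.List.max2?, PySem.List.max?]
  | append_singleton xs x ih =>
    rw [pv_max2?_append, ih]
    simp only [List.filter_append, List.filter_singleton]
    by_cases h2 : xs.filter p2 = []
    · by_cases hs : xs.filter ps = []
      · by_cases hnil : xs = []
        · subst hnil
          by_cases hx2 : p2 x <;> by_cases hxs : ps x <;>
            simp [hx2, hxs, pv_max?_nil, pv_max?_singleton]
        · rcases hF : PySem.List.max? xs k with _ | m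
          · exact absurd ((PySem.List.max?_eq_none_iff _ _).mp hF) hnil
          · have hmem : m ∈ xs := PySem.List.max?_mem hF
            have hp2m : p2 m = false := by
              have := List.filter_eq_nil_iff.mp h2 m hmem; simpa using this
            have hpsm : ps m = false := by
              have := List.filter_eq_nil_iff.mp hs m hmem; simpa using this
            by_cases hx2 : p2 x <;> by_cases hxs : ps x <;>
              simp [h2, hs, hF, hp2m, hpsm, hx2, hxs, pv_max?_append, pv_max?_singleton]
      · rcases hF : PySem.List.max? (xs.filter ps) k with _ | m
        · exact absurd ((PySem.List.max?_eq_none_iff _ _).mp hF) hs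
        · have hmem : m ∈ xs.filter ps := PySem.List.max?_mem hF
          have hpsm : ps m = true := (List.mem_filter.mp hmem).2
          have hp2m : p2 m = false := by
            have := List.filter_eq_nil_iff.mp h2 m (List.mem_filter.mp hmem).1
            simpa using this
          by_cases hx2 : p2 x <;> by_cases hxs : ps x <;>
            simp [h2, hs, hF, hp2m, hpsm, hx2, hxs, pv_max?_append, pv_max?_singleton]
    · rcases hF : PySem.List.max? (xs.filter p2) k with _ | m
      · exact absurd ((PySem.List.max?_eq_none_iff _ _).mp hF) h2
      · have hmem : m ∈ xs.filter p2 := PySem.List.max?_mem hF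
        have hp2m : p2 m = true := (List.mem_filter.mp hmem).2
        by_cases hx2 : p2 x <;> by_cases hxs : ps x <;>
          simp [h2, hF, hp2m, hx2, hxs, pv_max?_append]

-- ===== VERDICT (by name: the statement is the Claim_ definition above) =====
theorem choose_best_extraction_py_spec : Claim_equal_choose_best_extraction_py := by
  intro results _
  unfold Spec_choose_best_extraction_py choose_best_extraction_py choose_best_extraction_py_alt
  by_cases h : results = []
  · simp [h]
  · simp only [h, if_false]
    have := pv_staged_eq pvP2 pvPS pvTextLen results
    simpa [pvRank] using this.symm
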